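-- pv_equiv track=rewrite | github.com/FanaticsKang/auto_test_gen | skills/unit-test-cplusplus-generate-run/scripts/pack_batches.py | pack_lpt
-- ===== SOURCE A (Python) =====
-- import math
--
-- def pack_lpt(files_with_counts: list[tuple[str, int]],
--              agent_count: int, k_max: int) -> list[list[tuple[str, int]]]:
--     """
--     LPT 贪心装箱:按函数数降序逐个放入当前最轻的桶(未满 k_max 的桶里最轻的)。
--
--     若所有现有桶都满 k_max,则新开一个桶。
--     """
--     sorted_files = sorted(files_with_counts, key=lambda x: -x[1])
--     buckets: list[list[tuple[str, int]]] = [[] for _ in range(agent_count)]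
--     bucket_loads = [0] * agent_count
--
--     for fp, cnt in sorted_files:
--         # 找未满 k_max 的桶中 load 最小的
--         best = -1
--         best_load = math.inf
--         for i, bucket in enumerate(buckets):
--             if len(bucket) >= k_max:
--                 continue
--             if bucket_loads[i] < best_load:
--                 best_load = bucket_loads[i]
--                 best = i
--         if best < 0:
--             # 所有桶都满 k_max,新开一个
--             buckets.append([])
--             bucket_loads.append(0)
--             best = len(buckets) - 1
--         buckets[best].append((fp, cnt))
--         bucket_loads[best] += cnt
--
--     # 剔除空桶
--     return [b for b in buckets if b]
-- ===== SOURCE B (Python) =====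
-- def _sorted_insert(work, item):
--     """Insert item into ascending-sorted work (tuples compared lexicographically)."""
--     lo = 0
--     while lo < len(work) and work[lo] < item:
--         lo += 1
--     work.insert(lo, item)
--
--
-- def pack_lpt(files_with_counts: list[tuple[str, int]],
--              agent_count: int, k_max: int) -> list[list[tuple[str, int]]]:
--     """LPT greedy bin-packing via a sorted worklist of (load, index) for the
--     non-full buckets: the target bucket is the worklist head; no rescans."""
--     sorted_files = sorted(files_with_counts, key=lambda x: -x[1])
--     buckets: list[list[tuple[str, int]]] = [[] for _ in range(agent_count)]
--     loads = [0] * agent_count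
--     work = [(0, i) for i in range(agent_count)] if k_max > 0 else []
--     for fp, cnt in sorted_files:
--         if work:
--             _, best = work.pop(0)
--         else:
--             buckets.append([])
--             loads.append(0)
--             best = len(buckets) - 1
--         buckets[best].append((fp, cnt))
--         loads[best] += cnt
--         if len(buckets[best]) < k_max:
--             _sorted_insert(work, (loads[best], best))
--     return [b for b in buckets if b]
-- ===== Notes on version B (the rewrite author's own statement) =====
-- stated objective: alternative
-- what changed: A rescans every bucket (full or not) per file to find the least-loaded non-full one; B instead maintains an ascending sorted worklist of (load, index) pairs for the non-full buckets, taking the head and re-inserting the updated pair in sorted position, so the inner argmin scan disappears.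
import Mathlib
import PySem

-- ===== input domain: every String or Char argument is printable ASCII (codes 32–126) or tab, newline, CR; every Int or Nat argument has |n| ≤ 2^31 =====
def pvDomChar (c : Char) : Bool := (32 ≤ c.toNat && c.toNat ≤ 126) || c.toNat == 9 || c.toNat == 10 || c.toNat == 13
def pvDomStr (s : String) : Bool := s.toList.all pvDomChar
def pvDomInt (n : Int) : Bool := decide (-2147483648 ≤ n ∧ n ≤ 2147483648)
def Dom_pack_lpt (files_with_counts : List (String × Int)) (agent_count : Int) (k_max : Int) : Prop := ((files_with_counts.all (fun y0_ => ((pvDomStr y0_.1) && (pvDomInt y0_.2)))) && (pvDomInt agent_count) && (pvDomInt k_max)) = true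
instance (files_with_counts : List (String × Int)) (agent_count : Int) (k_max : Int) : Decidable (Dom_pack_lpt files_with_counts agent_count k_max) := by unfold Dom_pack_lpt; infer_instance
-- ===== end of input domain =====

-- B replaces A's per-file linear argmin scan over all buckets by a maintained
-- ascending sorted worklist of (load, index) for the non-full buckets (pop head,
-- re-insert in sorted position); same return value, different data structure.

-- ===== PORT A =====
-- inner scan of A: 'best = -1; best_load = inf; for i, bucket in enumerate(buckets): …'
-- best_load is math.inf initially: represented as Option Int (none = inf).
def scanStep (k_max : Int) (loads : List Int) (acc : Int × Option Int)
    (ib : Int × List (String × Int)) : Int × Option Int :=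
  if (ib.2.length : Int) ≥ k_max then acc
  else
    let li := PySem.List.pyGetD loads ib.1 0   -- bucket_loads[i]; i always in range
    match acc.2 with
    | none => (ib.1, some li)
    | some bl => if li < bl then (ib.1, some li) else acc

def packAStep (k_max : Int) (st : List (List (String × Int)) × List Int)
    (f : String × Int) : List (List (String × Int)) × List Int :=
  let scan := (PySem.List.enumerate st.1 0).foldl (scanStep k_max st.2) (-1, none)
  let t :=
    if scan.1 < 0 then (st.1 ++ [([] : List (String × Int))], st.2 ++ [(0 : Int)], (st.1.length : Int))
    else (st.1, st.2, scan.1)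
  (PySem.List.pySetD t.1 t.2.2 (PySem.List.pyGetD t.1 t.2.2 [] ++ [f]),
   PySem.List.pySetD t.2.1 t.2.2 (PySem.List.pyGetD t.2.1 t.2.2 0 + f.2))

def pack_lpt (files_with_counts : List (String × Int)) (agent_count : Int) (k_max : Int) :
    List (List (String × Int)) :=
  let sorted_files := PySem.List.sorted files_with_counts (fun x => -x.2) false
  let buckets : List (List (String × Int)) := (PySem.List.pyRange 0 agent_count 1).map (fun _ => [])
  let loads : List Int := List.replicate agent_count.toNat 0   -- [0] * agent_count
  ((sorted_files.foldl (packAStep k_max) (buckets, loads)).1).filter (fun b => !b.isEmpty)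

-- ===== PORT B =====
-- Python tuple comparison (load, index) < (load', index')
def pairLt (a b : Int × Int) : Bool := a.1 < b.1 || (a.1 == b.1 && a.2 < b.2)

-- _sorted_insert: walk past the elements < item, insert there
def sortedInsert (work : List (Int × Int)) (item : Int × Int) : List (Int × Int) :=
  match work with
  | [] => [item]
  | x :: xs => if pairLt x item then x :: sortedInsert xs item else item :: x :: xs

def packBStep (k_max : Int) (st : List (List (String × Int)) × List Int × List (Int × Int))
    (f : String × Int) : List (List (String × Int)) × List Int × List (Int × Int) :=
  let t :=
    match st.2.2 with
    | p :: rest => (st.1, st.2.1, rest, p.2)                 -- _, best = work.pop(0)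
    | [] => (st.1 ++ [([] : List (String × Int))], st.2.1 ++ [(0 : Int)], ([] : List (Int × Int)), (st.1.length : Int))
  let buckets := PySem.List.pySetD t.1 t.2.2.2 (PySem.List.pyGetD t.1 t.2.2.2 [] ++ [f])
  let loads := PySem.List.pySetD t.2.1 t.2.2.2 (PySem.List.pyGetD t.2.1 t.2.2.2 0 + f.2)
  let work :=
    if ((PySem.List.pyGetD buckets t.2.2.2 []).length : Int) < k_max
    then sortedInsert t.2.2.1 (PySem.List.pyGetD loads t.2.2.2 0, t.2.2.2)
    else t.2.2.1
  (buckets, loads, work)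

def pack_lpt_alt (files_with_counts : List (String × Int)) (agent_count : Int) (k_max : Int) :
    List (List (String × Int)) :=
  let sorted_files := PySem.List.sorted files_with_counts (fun x => -x.2) false
  let buckets : List (List (String × Int)) := (PySem.List.pyRange 0 agent_count 1).map (fun _ => [])
  let loads : List Int := List.replicate agent_count.toNat 0
  let work : List (Int × Int) :=
    if 0 < k_max then (PySem.List.pyRange 0 agent_count 1).map (fun i => ((0 : Int), i)) else []
  ((sorted_files.foldl (packBStep k_max) (buckets, loads, work)).1).filter (fun b => !b.isEmpty)

-- ===== PRECONDITION & SPEC =====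
def Spec_pack_lpt (files_with_counts : List (String × Int)) (agent_count : Int) (k_max : Int) (out : List (List (String × Int))) : Prop := out = pack_lpt_alt files_with_counts agent_count k_max
instance (files_with_counts : List (String × Int)) (agent_count : Int) (k_max : Int) (out : List (List (String × Int))) : Decidable (Spec_pack_lpt files_with_counts agent_count k_max out) := by unfold Spec_pack_lpt; infer_instance

-- ===== CLAIM (what is proved, stated in full; the proofs are below) =====
def Claim_equal_pack_lpt : Prop := ∀ (files_with_counts : List (String × Int)) (agent_count : Int) (k_max : Int), Dom_pack_lpt files_with_counts agent_count k_max → Spec_pack_lpt files_with_counts agent_count k_max (pack_lpt files_with_counts agent_count k_max)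

-- ===== LEMMAS AND PROOFS =====

-- candidate pairs (load, index) of the non-full buckets, in index order
def cand (k_max : Int) : Int → List (List (String × Int) × Int) → List (Int × Int)
  | _, [] => []
  | i, z :: zs => (if (z.1.length : Int) < k_max then [(z.2, i)] else []) ++ cand k_max (i + 1) zs

def PLe (a b : Int × Int) : Prop := a.1 < b.1 ∨ (a.1 = b.1 ∧ a.2 ≤ b.2)

theorem pairLt_iff (a b : Int × Int) :
    pairLt a b = true ↔ a.1 < b.1 ∨ (a.1 = b.1 ∧ a.2 < b.2) := by
  simp [pairLt]

def PackInv (k_max : Int) (bs : List (List (String × Int))) (ls : List Int)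
    (w : List (Int × Int)) : Prop :=
  bs.length = ls.length ∧ w.Pairwise (fun a b => pairLt a b = true) ∧
  (∀ p, p ∈ w ↔ p ∈ cand k_max 0 (bs.zip ls))

theorem mem_cand {k : Int} : ∀ (zs : List (List (String × Int) × Int)) (i0 : Int)
    (p : Int × Int), p ∈ cand k i0 zs ↔
      ∃ j : Nat, ∃ h : j < zs.length, p = (zs[j].2, i0 + j) ∧ (zs[j].1.length : Int) < k := by
  intro zs
  induction zs with
  | nil => intro i0 p; simp [cand]
  | cons z zs ih =>
    intro i0 p
    simp only [cand, List.mem_append]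
    constructor
    · intro h
      rcases h with h | h
      · split_ifs at h with hk
        · simp only [List.mem_singleton] at h
          exact ⟨0, by simp, by simpa using h, by simpa using hk⟩
        · simp at h
      · rcases (ih (i0 + 1) p).mp h with ⟨j, hj, hp, hk⟩
        exact ⟨j + 1, by simpa using hj, by simpa [add_assoc, add_comm, add_left_comm] using hp,
          by simpa using hk⟩
    · rintro ⟨j, hj, hp, hk⟩
      cases j with
      | zero =>
        left
        simp only [List.getElem_cons_zero] at hp hk
        rw [if_pos (by simpa using hk)]
        simp only [List.mem_singleton]
        simpa using hp
      | succ j =>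
        right
        exact (ih (i0 + 1) p).mpr ⟨j, by simpa using hj,
          by simpa [add_assoc, add_comm, add_left_comm] using hp, by simpa using hk⟩

-- A's scan over 'enumerate buckets' equals the fold of minStep over cand.
def minStep (acc : Int × Option Int) (p : Int × Int) : Int × Option Int :=
  match acc.2 with
  | none => (p.2, some p.1)
  | some bl => if p.1 < bl then (p.2, some p.1) else acc

theorem scan_eq_cand_fold (k : Int) (loads : List Int) :
    ∀ (bs : List (List (String × Int))) (n0 : Nat) (acc : Int × Option Int),
      n0 + bs.length ≤ loads.length →
      (PySem.List.enumerate bs (n0 : Int)).foldl (scanStep k loads) acc =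
        (cand k (n0 : Int) (bs.zip (loads.drop n0))).foldl minStep acc := by
  intro bs
  induction bs with
  | nil => intro n0 acc _; simp [PySem.List.enumerate_nil, cand]
  | cons b bs ih =>
    intro n0 acc hlen
    have hn0 : n0 < loads.length := by simp at hlen; omega
    rw [PySem.List.enumerate_cons, List.drop_eq_getElem_cons hn0]
    simp only [List.zip_cons_cons, cand, List.foldl_cons, List.foldl_append]
    have hget : PySem.List.pyGetD loads (n0 : Int) 0 = loads[n0] :=
      PySem.List.pyGetD_ofNat loads n0 0 hn0
    have hstep : ∀ a : Int × Option Int, scanStep k loads a ((n0 : Int), b) =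
        if (b.length : Int) < k then minStep a (loads[n0], (n0 : Int)) else a := by
      intro a
      simp only [scanStep, minStep, hget]
      by_cases hk : (b.length : Int) < k
      · rw [if_neg (by omega), if_pos hk]
      · rw [if_pos (by omega), if_neg hk]
    have hcast : (n0 : Int) + 1 = ((n0 + 1 : Nat) : Int) := by push_cast; ring
    by_cases hk : (b.length : Int) < k
    · rw [if_pos hk, hstep, if_pos hk]
      simp only [List.foldl_cons]
      rw [hcast, ih (n0 + 1) _ (by simp at hlen ⊢; omega)]
      simp [List.foldl_nil]
    · rw [if_neg hk, hstep, if_neg hk]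
      simp only [List.foldl_nil]
      rw [hcast, ih (n0 + 1) _ (by simp at hlen ⊢; omega)]

theorem fold_minStep_min : ∀ (c : List (Int × Int)) (i l : Int),
    (∀ q ∈ c, i < q.2) → c.Pairwise (fun a b => a.2 < b.2) →
    ∃ m, m ∈ (l, i) :: c ∧ (∀ q ∈ (l, i) :: c, PLe m q) ∧
      c.foldl minStep (i, some l) = (m.2, some m.1) := by
  intro c
  induction c with
  | nil =>
    intro i l _ _
    exact ⟨(l, i), by simp, by simp [PLe], rfl⟩
  | cons p c ih =>
    intro i l hgt hpw
    have hpw' := (List.pairwise_cons.mp hpw).2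
    have hp2 := (List.pairwise_cons.mp hpw).1
    simp only [List.foldl_cons]
    by_cases hlt : p.1 < l
    · have hfold : minStep (i, some l) p = (p.2, some p.1) := by
        simp [minStep, hlt]
      rw [hfold]
      obtain ⟨m, hm, hle, heq⟩ := ih p.2 p.1 hp2 hpw'
      refine ⟨m, ?_, ?_, ?_⟩
      · rcases List.mem_cons.mp hm with hm | hm
        · right; rw [hm]; simp only [Prod.mk.eta]; exact List.mem_cons_self
        · right; right; exact hm
      · intro q hq
        rcases List.mem_cons.mp hq with hq | hq
        · -- q = (l, i): m ≤ (p.1, p.2) < (l, i) in load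
          have h1 : PLe m (p.1, p.2) := hle _ (by simp)
          rw [hq]
          rcases h1 with h1 | h1
          · exact Or.inl (by simp at h1 ⊢; omega)
          · exact Or.inl (by simp at h1 ⊢; omega)
        · exact hle _ (by simpa using hq)
      · simpa using heq
    · have hfold : minStep (i, some l) p = (i, some l) := by
        simp [minStep, hlt]
      rw [hfold]
      obtain ⟨m, hm, hle, heq⟩ := ih i l (fun q hq => hgt q (by simp [hq])) hpw'
      refine ⟨m, ?_, ?_, ?_⟩
      · rcases List.mem_cons.mp hm with hm | hm
        · rw [hm]; exact List.mem_cons_self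
        · right; right; exact hm
      · intro q hq
        rcases List.mem_cons.mp hq with hq | hq
        · rw [hq]; exact hle _ (by simp)
        · rcases List.mem_cons.mp hq with hq' | hq'
          · -- q = p : (l,i) ≤ p since l ≤ p.1 and i < p.2
            have h1 : PLe m (l, i) := hle _ (by simp)
            have hip : i < p.2 := hgt p (by simp)
            rw [hq']
            rcases h1 with h1 | h1
            · simp only [PLe] at h1 ⊢; omega
            · simp only [PLe] at h1 ⊢; omega
          · exact hle _ (by simp [hq'])
      · exact heq

theorem pairLt_asymm_PLe {a b : Int × Int} (h1 : pairLt a b = true) (h2 : PLe b a) : False := by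
  rw [pairLt_iff] at h1
  rcases h1 with h1 | h1 <;> rcases h2 with h2 | h2 <;> omega

theorem mem_sortedInsert : ∀ (w : List (Int × Int)) (it q : Int × Int),
    q ∈ sortedInsert w it ↔ q = it ∨ q ∈ w := by
  intro w it
  induction w with
  | nil => intro q; simp [sortedInsert]
  | cons x xs ih =>
    intro q
    simp only [sortedInsert]
    split_ifs with h
    · simp only [List.mem_cons, ih]; tauto
    · simp only [List.mem_cons]

theorem pairwise_sortedInsert : ∀ (w : List (Int × Int)) (it : Int × Int),
    w.Pairwise (fun a b => pairLt a b = true) → (∀ x ∈ w, x.2 ≠ it.2) →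
    (sortedInsert w it).Pairwise (fun a b => pairLt a b = true) := by
  intro w it
  induction w with
  | nil => intro _ _; simp [sortedInsert]
  | cons x xs ih =>
    intro hpw hne
    have hx := (List.pairwise_cons.mp hpw).1
    have hxs := (List.pairwise_cons.mp hpw).2
    simp only [sortedInsert]
    split_ifs with h
    · refine List.pairwise_cons.mpr ⟨?_, ih hxs (fun y hy => hne y (by simp [hy]))⟩
      intro y hy
      rcases (mem_sortedInsert xs it y).mp hy with rfl | hy
      · exact h
      · exact hx y hy
    · refine List.pairwise_cons.mpr ⟨?_, hpw⟩
      intro y hy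
      have hlt_itx : pairLt it x = true := by
        have hne' := hne x (by simp)
        rw [pairLt_iff]
        rw [pairLt_iff] at h
        push Not at h
        rcases lt_trichotomy it.1 x.1 with h1 | h1 | h1
        · exact Or.inl h1
        · refine Or.inr ⟨h1.symm ▸ rfl, ?_⟩
          omega
        · exfalso; omega
      rcases List.mem_cons.mp hy with rfl | hy
      · exact hlt_itx
      · have := hx y hy
        rw [pairLt_iff] at hlt_itx this ⊢
        rcases hlt_itx with h1 | h1 <;> rcases this with h2 | h2 <;> omega

theorem cand_pairwise (k : Int) : ∀ (zs : List (List (String × Int) × Int)) (i0 : Int),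
    (cand k i0 zs).Pairwise (fun a b => a.2 < b.2) := by
  intro zs
  induction zs with
  | nil => intro i0; simp [cand]
  | cons z zs ih =>
    intro i0
    simp only [cand]
    refine List.pairwise_append.mpr ⟨?_, ih (i0 + 1), ?_⟩
    · split_ifs <;> simp
    · intro a ha b hb
      obtain ⟨j, hj, hb', _⟩ := (mem_cand zs (i0 + 1) b).mp hb
      have ha' : a.2 = i0 := by
        split_ifs at ha with h
        · simp only [List.mem_singleton] at ha; rw [ha]
        · simp at ha
      rw [ha', hb']
      simp
      omega

theorem cand_snd_inj {k i0 : Int} {zs : List (List (String × Int) × Int)} {p q : Int × Int}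
    (hp : p ∈ cand k i0 zs) (hq : q ∈ cand k i0 zs) (h2 : p.2 = q.2) : p = q := by
  obtain ⟨j, hj, hp', _⟩ := (mem_cand zs i0 p).mp hp
  obtain ⟨j', hj', hq', _⟩ := (mem_cand zs i0 q).mp hq
  have : j = j' := by
    rw [hp', hq'] at h2
    simp at h2
    omega
  subst this
  rw [hp', hq']

theorem getD_append_len {α : Type} (xs : List α) (v d : α) :
    PySem.List.pyGetD (xs ++ [v]) ((xs.length : Nat) : Int) d = v := by
  rw [PySem.List.pyGetD_ofNat _ _ _ (by simp)]
  simp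

theorem set_append_len {α : Type} (xs : List α) (v u : α) :
    (xs ++ [v]).set xs.length u = xs ++ [u] := by
  induction xs with
  | nil => rfl
  | cons x xs ih => simp [ih]

theorem inv_update (k : Int) (f : String × Int) (bs : List (List (String × Int))) (ls : List Int)
    (w₀ : List (Int × Int)) (n : Nat) (hlen : bs.length = ls.length) (hn : n < bs.length)
    (hw₀pw : w₀.Pairwise (fun a b => pairLt a b = true))
    (hw₀mem : ∀ p, p ∈ w₀ ↔ p ∈ cand k 0 (bs.zip ls) ∧ p.2 ≠ (n : Int)) :
    PackInv k (bs.set n ((bs[n]'hn) ++ [f])) (ls.set n ((ls[n]'(hlen ▸ hn)) + f.2))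
      (if ((((bs[n]'hn) ++ [f]).length : Int) < k)
       then sortedInsert w₀ ((ls[n]'(hlen ▸ hn)) + f.2, (n : Int)) else w₀) := by
  have hln : n < ls.length := hlen ▸ hn
  have hzlen : ((bs.set n ((bs[n]'hn) ++ [f])).zip (ls.set n ((ls[n]'hln) + f.2))).length
      = bs.length := by simp; omega
  have hozlen : (bs.zip ls).length = bs.length := by simp; omega
  have hget : ∀ j, ∀ hj : j < bs.length,
      ((bs.set n ((bs[n]'hn) ++ [f])).zip (ls.set n ((ls[n]'hln) + f.2)))[j]'(by omega) =
        if n = j then ((bs[n]'hn) ++ [f], (ls[n]'hln) + f.2) else (bs[j]'hj, ls[j]'(hlen ▸ hj)) := by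
    intro j hj
    rw [List.getElem_zip, List.getElem_set, List.getElem_set]
    split_ifs with h <;> rfl
  have hoget : ∀ j, ∀ hj : j < bs.length,
      (bs.zip ls)[j]'(by omega) = (bs[j]'hj, ls[j]'(hlen ▸ hj)) := by
    intro j hj
    rw [List.getElem_zip]
  refine ⟨by simp [hlen], ?_, ?_⟩
  · split_ifs with hfull
    · exact pairwise_sortedInsert w₀ _ hw₀pw (fun x hx => ((hw₀mem x).mp hx).2)
    · exact hw₀pw
  · intro p
    rw [mem_cand]
    constructor
    · intro hp
      have hp' : p = ((ls[n]'hln) + f.2, (n : Int)) ∨ (p ∈ cand k 0 (bs.zip ls) ∧ p.2 ≠ (n : Int)) := by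
        split_ifs at hp with hfull
        · rcases (mem_sortedInsert w₀ _ p).mp hp with h | h
          · exact Or.inl h
          · exact Or.inr ((hw₀mem p).mp h)
        · exact Or.inr ((hw₀mem p).mp hp)
      rcases hp' with rfl | ⟨hpc, hpne⟩
      · refine ⟨n, by omega, ?_, ?_⟩
        · rw [hget n hn]; simp
        · rw [hget n hn]
          split_ifs at hp with hfull
          · simpa using hfull
          · exfalso
            rcases (hw₀mem _).mp hp with ⟨_, hne⟩
            exact hne rfl
      · obtain ⟨j, hj, hpj, hnf⟩ := (mem_cand (bs.zip ls) 0 p).mp hpc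
        have hj' : j < bs.length := by omega
        have hjn : n ≠ j := by
          intro h
          apply hpne
          rw [hpj]
          simp [h]
        refine ⟨j, by omega, ?_, ?_⟩
        · rw [hget j hj', if_neg hjn, hpj, hoget j hj']
        · rw [hget j hj', if_neg hjn]
          rw [hoget j hj'] at hpj hnf
          · exact hnf
    · rintro ⟨j, hj, hpj, hnf⟩
      have hj' : j < bs.length := by omega
      rw [hget j hj'] at hpj hnf
      by_cases hjn : n = j
      · subst hjn
        rw [if_pos rfl] at hpj hnf
        rw [if_pos hnf]
        apply (mem_sortedInsert w₀ _ p).mpr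
        left
        rw [hpj]
        simp
      · rw [if_neg hjn] at hpj hnf
        have hpc : p ∈ cand k 0 (bs.zip ls) := by
          rw [mem_cand]
          exact ⟨j, by omega, by rw [hoget j hj']; exact hpj, by rw [hoget j hj']; exact hnf⟩
        have hpne : p.2 ≠ (n : Int) := by
          rw [hpj]
          simp
          omega
        have hw : p ∈ w₀ := (hw₀mem p).mpr ⟨hpc, hpne⟩
        split_ifs with hfull
        · exact (mem_sortedInsert w₀ _ p).mpr (Or.inr hw)
        · exact hw

theorem getD_set_self {α : Type} (xs : List α) (n : Nat) (v d : α) (h : n < xs.length) :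
    PySem.List.pyGetD (xs.set n v) ((n : Nat) : Int) d = v := by
  rw [PySem.List.pyGetD_ofNat _ _ _ (by simpa using h)]
  exact List.getElem_set_self _

theorem step_agree (k : Int) (bs : List (List (String × Int))) (ls : List Int)
    (w : List (Int × Int)) (f : String × Int) (hInv : PackInv k bs ls w) :
    packAStep k (bs, ls) f = ((packBStep k (bs, ls, w) f).1, (packBStep k (bs, ls, w) f).2.1)
    ∧ PackInv k (packBStep k (bs, ls, w) f).1 (packBStep k (bs, ls, w) f).2.1
        (packBStep k (bs, ls, w) f).2.2 := by
  obtain ⟨hlen, hpw, hmem⟩ := hInv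
  have hscan : (PySem.List.enumerate bs (0 : Int)).foldl (scanStep k ls) ((-1 : Int), (none : Option Int))
      = (cand k 0 (bs.zip ls)).foldl minStep (-1, none) := by
    have h := scan_eq_cand_fold k ls bs 0 (-1, none) (by omega)
    simpa using h
  cases w with
  | nil =>
    have hCnil : cand k 0 (bs.zip ls) = [] := by
      rcases hCe : cand k 0 (bs.zip ls) with _ | ⟨c, cs⟩
      · rfl
      · exfalso
        have : c ∈ ([] : List (Int × Int)) := (hmem c).mpr (by rw [hCe]; exact List.mem_cons_self)
        simp at this
    have hscan0 : (PySem.List.enumerate bs (0 : Int)).foldl (scanStep k ls)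
        ((-1 : Int), (none : Option Int)) = (-1, none) := by rw [hscan, hCnil]; rfl
    have hgb : PySem.List.pyGetD (bs ++ [[]]) ((bs.length : Nat) : Int) ([] : List (String × Int)) = [] :=
      getD_append_len bs [] []
    have hgl : PySem.List.pyGetD (ls ++ [0]) ((bs.length : Nat) : Int) (0 : Int) = 0 := by
      rw [hlen]; exact getD_append_len ls 0 0
    have hsb : PySem.List.pySetD (bs ++ [[]]) ((bs.length : Nat) : Int) ([] ++ [f]) = bs ++ [[f]] := by
      rw [PySem.List.pySetD_natCast, set_append_len]; rfl
    have hsl : PySem.List.pySetD (ls ++ [0]) ((bs.length : Nat) : Int) (0 + f.2) = ls ++ [0 + f.2] := by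
      rw [PySem.List.pySetD_natCast, hlen, set_append_len]
    have hBeq : packBStep k (bs, ls, []) f = (bs ++ [[f]], ls ++ [0 + f.2],
        if (((([] : List (String × Int)) ++ [f]).length : Int) < k)
        then sortedInsert [] (0 + f.2, (bs.length : Int)) else []) := by
      simp only [packBStep, hgb, hgl, hsb, hsl]
      have h1 : PySem.List.pyGetD (bs ++ [[f]]) ((bs.length : Nat) : Int) ([] : List (String × Int)) = [f] :=
        getD_append_len bs [f] []
      rw [h1]
      have h2 : PySem.List.pyGetD (ls ++ [0 + f.2]) ((bs.length : Nat) : Int) (0 : Int) = 0 + f.2 := by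
        rw [hlen]; exact getD_append_len ls (0 + f.2) 0
      rw [h2]
      simp
    have hAeq : packAStep k (bs, ls) f = (bs ++ [[f]], ls ++ [0 + f.2]) := by
      simp only [packAStep, hscan0]
      rw [if_pos (by norm_num)]
      simp only [hgb, hgl, hsb, hsl]
    constructor
    · rw [hAeq, hBeq]
    · rw [hBeq]
      have hinv := inv_update k f (bs ++ [[]]) (ls ++ [0]) [] bs.length
        (by simp [hlen]) (by simp)
        List.Pairwise.nil
        (by
          intro p
          simp only [List.not_mem_nil, false_iff]
          rintro ⟨hpc, hpne⟩
          obtain ⟨j, hj, hpj, hnf⟩ := (mem_cand ((bs ++ [[]]).zip (ls ++ [0])) 0 p).mp hpc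
          have hjlen : j < bs.length + 1 := by
            rw [List.length_zip] at hj
            simp [hlen] at hj
            omega
          by_cases hje : j = bs.length
          · apply hpne
            have hp2 : p.2 = (j : Int) := by rw [hpj]; simp
            rw [hp2, hje]
          · have hjn : j < bs.length := by omega
            have hzget : ((bs ++ [[]]).zip (ls ++ [0]))[j]'(by simp [List.length_zip, hlen]; omega)
                = ((bs.zip ls)[j]'(by simp [List.length_zip, hlen]; omega)) := by
              rw [List.getElem_zip, List.getElem_zip,
                List.getElem_append_left (by omega), List.getElem_append_left (by rw [← hlen]; omega)]
            rw [hzget] at hpj hnf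
            have : p ∈ cand k 0 (bs.zip ls) := by
              rw [mem_cand]
              exact ⟨j, by simp [List.length_zip, hlen]; omega, hpj, hnf⟩
            rw [hCnil] at this
            simp at this)
      -- massage inv_update's statement into the packBStep shape
      have e3 : ((bs ++ [[]])[bs.length]'(by simp)) = ([] : List (String × Int)) := by simp
      have e4 : ((ls ++ [0])[bs.length]'(by simp [hlen])) = (0 : Int) := by
        rw [List.getElem_append_right (by omega)]
        simp
      rw [e3, e4] at hinv
      have e1 : (bs ++ [[]]).set bs.length (([] : List (String × Int)) ++ [f]) = bs ++ [[f]] := by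
        rw [set_append_len]; rfl
      have e2 : (ls ++ [0]).set bs.length ((0 : Int) + f.2) = ls ++ [0 + f.2] := by
        rw [hlen, set_append_len]
      rw [e1, e2] at hinv
      exact hinv
  | cons h rest =>
    have hhC : h ∈ cand k 0 (bs.zip ls) := (hmem h).mp List.mem_cons_self
    obtain ⟨jn, hjn, hh, hnf⟩ := (mem_cand (bs.zip ls) 0 h).mp hhC
    have hjb : jn < bs.length := by rw [List.length_zip] at hjn; omega
    have hjl : jn < ls.length := by omega
    have hh2 : h.2 = ((jn : Nat) : Int) := by rw [hh]; simp
    have hh1 : h.1 = ls[jn]'hjl := by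
      rw [hh]; simp [List.getElem_zip]
    -- the scan returns h
    rcases hCe : cand k 0 (bs.zip ls) with _ | ⟨c0, C'⟩
    · exfalso; rw [hCe] at hhC; simp at hhC
    have hCpw := cand_pairwise k (bs.zip ls) 0
    rw [hCe] at hCpw
    obtain ⟨m, hmmem, hmle, hmfold⟩ := fold_minStep_min C' c0.2 c0.1
      (fun q hq => (List.pairwise_cons.mp hCpw).1 q hq) (List.pairwise_cons.mp hCpw).2
    have hscanval : (PySem.List.enumerate bs (0 : Int)).foldl (scanStep k ls)
        ((-1 : Int), (none : Option Int)) = (m.2, some m.1) := by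
      rw [hscan, hCe]
      simp only [List.foldl_cons]
      have : minStep ((-1 : Int), (none : Option Int)) c0 = (c0.2, some c0.1) := by
        simp [minStep]
      rw [this, hmfold]
    have hmh : m = h := by
      have hmw : m ∈ h :: rest := by
        apply (hmem m).mpr
        rw [hCe]
        simpa using hmmem
      rcases List.mem_cons.mp hmw with hmw | hmw
      · exact hmw
      · exfalso
        have hlt : pairLt h m = true := (List.pairwise_cons.mp hpw).1 m hmw
        have hle : PLe m h := by
          apply hmle
          have : h ∈ c0 :: C' := by rw [← hCe]; exact hhC
          simpa using this
        exact pairLt_asymm_PLe hlt hle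
    subst hmh
    -- both sides choose bucket jn
    have hBeq : packBStep k (bs, ls, m :: rest) f = (bs.set jn ((bs[jn]'hjb) ++ [f]),
        ls.set jn ((ls[jn]'hjl) + f.2),
        if ((((bs[jn]'hjb) ++ [f]).length : Int) < k)
        then sortedInsert rest ((ls[jn]'hjl) + f.2, (jn : Int)) else rest) := by
      simp only [packBStep, hh2]
      rw [PySem.List.pyGetD_ofNat _ _ _ (by simpa using hjb),
        PySem.List.pyGetD_ofNat _ _ _ (by simpa using hjl),
        PySem.List.pySetD_natCast, PySem.List.pySetD_natCast,
        getD_set_self _ _ _ _ hjb, getD_set_self _ _ _ _ hjl]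
    have hAeq : packAStep k (bs, ls) f = (bs.set jn ((bs[jn]'hjb) ++ [f]),
        ls.set jn ((ls[jn]'hjl) + f.2)) := by
      simp only [packAStep, hscanval]
      rw [if_neg (by rw [hh2]; simp)]
      simp only [hh2]
      rw [PySem.List.pyGetD_ofNat _ _ _ (by simpa using hjb),
        PySem.List.pyGetD_ofNat _ _ _ (by simpa using hjl),
        PySem.List.pySetD_natCast, PySem.List.pySetD_natCast]
    refine ⟨by rw [hAeq, hBeq], ?_⟩
    rw [hBeq]
    apply inv_update k f bs ls rest jn hlen hjb (List.pairwise_cons.mp hpw).2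
    intro p
    constructor
    · intro hp
      have hpw' : p ∈ m :: rest := by simp [hp]
      refine ⟨(hmem p).mp hpw', ?_⟩
      intro hp2
      have hpm : p = m := cand_snd_inj ((hmem p).mp hpw') hhC (by rw [hp2, hh2])
      have hlt : pairLt m p = true := (List.pairwise_cons.mp hpw).1 p hp
      rw [hpm] at hlt
      rw [pairLt_iff] at hlt
      omega
    · rintro ⟨hpc, hpne⟩
      have : p ∈ m :: rest := (hmem p).mpr hpc
      rcases List.mem_cons.mp this with rfl | hp
      · exact absurd (by rw [hh2]) hpne
      · exact hp

theorem fold_agree (k : Int) : ∀ (fs : List (String × Int)) (bs : List (List (String × Int)))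
    (ls : List Int) (w : List (Int × Int)), PackInv k bs ls w →
    (fs.foldl (packAStep k) (bs, ls)).1 = (fs.foldl (packBStep k) (bs, ls, w)).1 := by
  intro fs
  induction fs with
  | nil => intro bs ls w _; rfl
  | cons f fs ih =>
    intro bs ls w hInv
    obtain ⟨heq, hInv'⟩ := step_agree k bs ls w f hInv
    simp only [List.foldl_cons]
    rw [heq]
    exact ih _ _ _ hInv'

theorem init_inv (k ac : Int) :
    PackInv k ((PySem.List.pyRange 0 ac 1).map (fun _ => []))
      (List.replicate ac.toNat 0)
      (if 0 < k then (PySem.List.pyRange 0 ac 1).map (fun i => ((0 : Int), i)) else []) := by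
  have hlen : ((PySem.List.pyRange 0 ac 1).map
      (fun _ => ([] : List (String × Int)))).length = ac.toNat := by
    simp [PySem.List.length_pyRange_one]
  have hzs : ∀ j : Nat, ∀ h : j < (((PySem.List.pyRange 0 ac 1).map
        (fun _ => ([] : List (String × Int)))).zip (List.replicate ac.toNat (0 : Int))).length,
      (((PySem.List.pyRange 0 ac 1).map (fun _ => ([] : List (String × Int)))).zip
        (List.replicate ac.toNat (0 : Int)))[j] = ([], 0) := by
    intro j h
    rw [List.length_zip, hlen] at h
    simp only [List.getElem_zip, List.getElem_map, List.getElem_replicate]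
  refine ⟨by simp [PySem.List.length_pyRange_one], ?_, ?_⟩
  · split_ifs with hk
    · rw [List.pairwise_map]
      refine (PySem.List.pairwise_lt_pyRange_one (a := 0) (b := ac)).imp ?_
      intro a b hab
      simp [pairLt, hab]
    · exact List.Pairwise.nil
  · intro p
    rw [mem_cand]
    have hzlen : (((PySem.List.pyRange 0 ac 1).map (fun _ => ([] : List (String × Int)))).zip
        (List.replicate ac.toNat (0 : Int))).length = ac.toNat := by
      simp [PySem.List.length_pyRange_one]
    split_ifs with hk
    · simp only [List.mem_map, PySem.List.mem_pyRange_one]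
      constructor
      · rintro ⟨i, ⟨h0, hac⟩, rfl⟩
        refine ⟨i.toNat, by omega, ?_, ?_⟩
        · rw [hzs i.toNat (by omega)]; simp; omega
        · rw [hzs i.toNat (by omega)]; simpa using hk
      · rintro ⟨j, hj, hp, hk'⟩
        rw [hzs j hj] at hp
        refine ⟨(j : Int), ⟨by omega, by rw [hzlen] at hj; omega⟩, ?_⟩
        rw [hp]; simp
    · simp only [List.not_mem_nil, false_iff]
      rintro ⟨j, hj, hp, hk'⟩
      rw [hzs j hj] at hk'
      simp at hk'
      omega

-- ===== VERDICT (by name: the statement is the Claim_ definition above) =====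
theorem pack_lpt_spec : Claim_equal_pack_lpt := by
  intro files ac k _
  unfold Spec_pack_lpt pack_lpt pack_lpt_alt
  simp only []
  rw [fold_agree k _ _ _ _ (init_inv k ac)]
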